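-- pv_equiv track=rewrite | github.com/worldwidelaw/legal-sources | sources/ZA/CompTribunal/bootstrap.py | _pick_best_pdf
-- ===== SOURCE A (Python) =====
-- from typing import Generator, Optional, Dict, Any, List, Tuple
--
-- def _pick_best_pdf(pdf_urls: List[Dict[str, str]]) -> Optional[str]:
--     """Pick the best PDF to extract text from: prefer Reasons > Order > any."""
--     if not pdf_urls:
--         return None
--
--     # Prefer "Reasons" PDFs (detailed analysis) over "Order" (short)
--     for pdf in pdf_urls:
--         label = pdf["label"].lower()
--         if "reason" in label:
--             return pdf["url"]
--
--     for pdf in pdf_urls: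
--         label = pdf["label"].lower()
--         if "order" in label:
--             return pdf["url"]
--
--     return pdf_urls[0]["url"]
-- ===== SOURCE B (Python) =====
-- from typing import Optional, Dict, List
--
--
-- def _pick_best_pdf(pdf_urls: List[Dict[str, str]]) -> Optional[str]:
--     """Pick the best PDF to extract text from: prefer Reasons > Order > any."""
--     if not pdf_urls:
--         return None
--     order_pdf = None
--     for pdf in pdf_urls:
--         label = pdf["label"].lower()
--         if "reason" in label:
--             return pdf["url"]
--         if order_pdf is None and "order" in label:
--             order_pdf = pdf
--     if order_pdf is not None:
--         return order_pdf["url"]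
--     return pdf_urls[0]["url"]
-- ===== Notes on version B (the rewrite author's own statement) =====
-- stated objective: simpler
-- what changed: Replaced A's two sequential scans (first for 'reason', then for 'order') by one single pass that returns immediately on the first 'reason' label and records the first 'order'-labelled entry, reading its 'url' only after the loop, falling back to the first entry's URL.
import Mathlib
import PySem

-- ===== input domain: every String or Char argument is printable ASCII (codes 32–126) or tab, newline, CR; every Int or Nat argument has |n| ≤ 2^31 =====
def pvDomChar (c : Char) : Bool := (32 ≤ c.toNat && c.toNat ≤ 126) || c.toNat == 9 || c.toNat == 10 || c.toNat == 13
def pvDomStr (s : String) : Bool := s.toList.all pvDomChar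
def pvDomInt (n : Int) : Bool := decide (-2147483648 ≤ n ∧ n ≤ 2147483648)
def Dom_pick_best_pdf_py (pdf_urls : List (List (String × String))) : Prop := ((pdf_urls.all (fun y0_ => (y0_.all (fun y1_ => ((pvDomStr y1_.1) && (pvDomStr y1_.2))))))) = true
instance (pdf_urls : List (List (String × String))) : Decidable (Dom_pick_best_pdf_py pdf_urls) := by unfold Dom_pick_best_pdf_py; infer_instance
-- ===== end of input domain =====

-- B replaces A's two sequential scans by one single pass that records the first 'order'-labelled
-- entry and reads its "url" only after the loop; objective: simpler. Each dict (association list)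
-- is read through PySem.Dict; Pre_ guarantees the keys Python actually accesses exist, so the
-- getD default "" below is never used inside Pre_ (Python raises KeyError there, in A and B alike).

-- ===== PORT A =====
-- first loop: return the url of the first entry whose lowered label contains "reason"
def pbpReasonLoop : List (List (String × String)) → Option String
  | [] => none
  | pdf :: rest =>
    let label := PySem.Str.lower ((PySem.Dict.mk pdf).getD "label" "")
    if PySem.Str.isIn "reason" label then some ((PySem.Dict.mk pdf).getD "url" "")
    else pbpReasonLoop rest

-- second loop: return the url of the first entry whose lowered label contains "order"
def pbpOrderLoop : List (List (String × String)) → Option String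
  | [] => none
  | pdf :: rest =>
    let label := PySem.Str.lower ((PySem.Dict.mk pdf).getD "label" "")
    if PySem.Str.isIn "order" label then some ((PySem.Dict.mk pdf).getD "url" "")
    else pbpOrderLoop rest

def pick_best_pdf_py (pdf_urls : List (List (String × String))) : Option String :=
  if pdf_urls = [] then none
  else
    match pbpReasonLoop pdf_urls with
    | some u => some u
    | none =>
      match pbpOrderLoop pdf_urls with
      | some u => some u
      | none => some ((PySem.Dict.mk (pdf_urls.headD [])).getD "url" "")

-- ===== PORT B =====
-- single pass: `ord` holds the recorded first 'order'-labelled entry (order_pdf); `fb` is pdf_urls[0];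
-- "url" is read only when an entry is chosen (on the 'reason' return, or after the loop)
def pbpAltGo : List (List (String × String)) → Option (List (String × String)) → List (String × String) → Option String
  | [], ord, fb =>
    match ord with
    | some o => some ((PySem.Dict.mk o).getD "url" "")
    | none => some ((PySem.Dict.mk fb).getD "url" "")
  | pdf :: rest, ord, fb =>
    let label := PySem.Str.lower ((PySem.Dict.mk pdf).getD "label" "")
    if PySem.Str.isIn "reason" label then some ((PySem.Dict.mk pdf).getD "url" "")
    else if ord.isNone && PySem.Str.isIn "order" label then
      pbpAltGo rest (some pdf) fb
    else pbpAltGo rest ord fb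

def pick_best_pdf_py_alt (pdf_urls : List (List (String × String))) : Option String :=
  match pdf_urls with
  | [] => none
  | pdf :: _ => pbpAltGo pdf_urls none pdf

-- ===== PRECONDITION & SPEC =====
-- Pre_ excludes exactly the inputs on which Python A (and B identically) raises KeyError: every
-- entry up to and including the first 'reason'-labelled one must have a "label" key, and the entry
-- whose "url" Python reads — the first 'reason' entry, else the first 'order' entry, else the head —
-- must have a "url" key.
def pbpNoReason (pdf : List (String × String)) : Bool :=
  !(PySem.Str.isIn "reason" (PySem.Str.lower ((PySem.Dict.mk pdf).getD "label" "")))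
def pbpIsOrder (pdf : List (String × String)) : Bool :=
  PySem.Str.isIn "order" (PySem.Str.lower ((PySem.Dict.mk pdf).getD "label" ""))
def Pre_pick_best_pdf_py (pdf_urls : List (List (String × String))) : Prop :=
  (∀ pdf ∈ pdf_urls.takeWhile pbpNoReason, (PySem.Dict.mk pdf).contains "label" = true)
  ∧ ((pdf_urls.dropWhile pbpNoReason).head?.all (fun r => (PySem.Dict.mk r).contains "url") = true)
  ∧ ((pdf_urls.dropWhile pbpNoReason).isEmpty = true →
      ((pdf_urls.filter pbpIsOrder).head?.all (fun o => (PySem.Dict.mk o).contains "url") = true))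
  ∧ ((pdf_urls.dropWhile pbpNoReason).isEmpty = true →
      (pdf_urls.filter pbpIsOrder).isEmpty = true →
      pdf_urls.head?.all (fun h => (PySem.Dict.mk h).contains "url") = true)
instance (pdf_urls : List (List (String × String))) : Decidable (Pre_pick_best_pdf_py pdf_urls) := by unfold Pre_pick_best_pdf_py; infer_instance

def pvWitness_pick_best_pdf_py : (List (List (String × String))) :=
  [[("label", "Reasons for decision"), ("url", "https://x/r.pdf")], [("label", "Order"), ("url", "https://x/o.pdf")]]

def Spec_pick_best_pdf_py (pdf_urls : List (List (String × String))) (out : Option String) : Prop := out = pick_best_pdf_py_alt pdf_urls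
instance (pdf_urls : List (List (String × String))) (out : Option String) : Decidable (Spec_pick_best_pdf_py pdf_urls out) := by unfold Spec_pick_best_pdf_py; infer_instance

-- ===== CLAIM (what is proved, stated in full; the proofs are below) =====
def Claim_equal_pick_best_pdf_py : Prop := ∀ (pdf_urls : List (List (String × String))), Dom_pick_best_pdf_py pdf_urls → Pre_pick_best_pdf_py pdf_urls → Spec_pick_best_pdf_py pdf_urls (pick_best_pdf_py pdf_urls)

-- ===== LEMMAS AND PROOFS =====

-- the single pass equals: first 'reason' hit, else the url of the recorded order entry,
-- else the first 'order' hit, else the fallback entry's url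
theorem pbpAltGo_eq (l : List (List (String × String))) (ord : Option (List (String × String))) (fb : List (String × String)) :
    pbpAltGo l ord fb =
      match pbpReasonLoop l with
      | some u => some u
      | none =>
        match ord with
        | some o => some ((PySem.Dict.mk o).getD "url" "")
        | none => some ((pbpOrderLoop l).getD ((PySem.Dict.mk fb).getD "url" "")) := by
  induction l generalizing ord with
  | nil => cases ord <;> simp [pbpAltGo, pbpReasonLoop, pbpOrderLoop]
  | cons pdf rest ih =>
    simp only [pbpAltGo, pbpReasonLoop, pbpOrderLoop]
    by_cases hr : PySem.Str.isIn "reason" (PySem.Str.lower ((PySem.Dict.mk pdf).getD "label" "")) = true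
    · simp only [if_pos hr]
    · simp only [if_neg hr]
      by_cases ho : PySem.Str.isIn "order" (PySem.Str.lower ((PySem.Dict.mk pdf).getD "label" "")) = true
      · simp only [if_pos ho]
        cases ord with
        | none =>
          rw [if_pos (by rw [Option.isNone_none, Bool.true_and]; exact ho), ih]
          cases pbpReasonLoop rest <;> simp
        | some o =>
          rw [if_neg (by rw [Option.isNone_some, Bool.false_and]; exact Bool.false_ne_true), ih]
      · simp only [if_neg ho]
        rw [if_neg (fun h => ho ((Bool.and_eq_true _ _).mp h).2), ih]

theorem pvWitness_ok : Dom_pick_best_pdf_py pvWitness_pick_best_pdf_py ∧ Pre_pick_best_pdf_py pvWitness_pick_best_pdf_py := by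
  decide

-- ===== VERDICT (by name: the statement is the Claim_ definition above) =====
theorem pick_best_pdf_py_spec : Claim_equal_pick_best_pdf_py := by
  intro pdf_urls _ _
  unfold Spec_pick_best_pdf_py pick_best_pdf_py pick_best_pdf_py_alt
  cases pdf_urls with
  | nil => simp
  | cons pdf rest =>
    simp only [List.cons_ne_nil, if_false, List.headD_cons]
    rw [pbpAltGo_eq]
    cases pbpReasonLoop (pdf :: rest) with
    | some u => simp
    | none => cases pbpOrderLoop (pdf :: rest) <;> simp
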